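-- pv_equiv track=rewrite | github.com/henry-luo/lambda | test/benchmark/beng/python/knucleotide.py | extract_three
-- ===== SOURCE A (Python) =====
-- def extract_three(text):
--     lines = text.split('\n')
--     seq = []
--     in_three = False
--     for line in lines:
--         if line and line[0] == '>':
--             if in_three:
--                 break
--             if line.startswith('>THREE'):
--                 in_three = True
--         elif in_three and line:
--             seq.append(line.upper())
--     return ''.join(seq)
-- ===== SOURCE B (Python) =====
-- def extract_three(text):
--     lines = text.split('\n')
--     i = next((k for k, l in enumerate(lines) if l.startswith('>THREE')), None)
--     if i is None:
--         return ''
--     body = lines[i + 1:]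
--     j = next((k for k, l in enumerate(body) if l.startswith('>')), None)
--     if j is not None:
--         body = body[:j]
--     return ''.join(l.upper() for l in body if l)
-- ===== Notes on version B (the rewrite author's own statement) =====
-- stated objective: idiomatic
-- what changed: Replaces A's single stateful loop with a flag and break by a locate-then-slice decomposition: find the index of the first THREE-section header line, slice the lines after it, cut at the index of the next header line, then filter-map-join.
import Mathlib
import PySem

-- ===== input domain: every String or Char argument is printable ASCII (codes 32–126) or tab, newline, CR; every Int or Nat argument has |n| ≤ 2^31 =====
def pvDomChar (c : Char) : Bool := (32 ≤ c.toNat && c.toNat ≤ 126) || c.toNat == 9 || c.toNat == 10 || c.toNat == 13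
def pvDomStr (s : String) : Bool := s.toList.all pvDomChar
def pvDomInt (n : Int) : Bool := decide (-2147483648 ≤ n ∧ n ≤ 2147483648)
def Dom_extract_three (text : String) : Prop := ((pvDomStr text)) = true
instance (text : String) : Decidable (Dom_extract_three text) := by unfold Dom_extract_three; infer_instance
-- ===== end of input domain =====

-- B replaces A's single stateful loop (flag + break) by a locate-then-slice decomposition (idiomatic; same O(n) cost).

-- ===== PORT A =====
-- the for-loop over lines with accumulator seq and flag in_three; returning seq models 'break'
def extractALoop : List String → List String → Bool → List String
  | [], seq, _ => seq
  | line :: rest, seq, in_three =>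
    if line ≠ "" ∧ PySem.Str.pyGet? line 0 = some '>' then
      if in_three then seq
      else if PySem.Str.startswith line ">THREE" then extractALoop rest seq true
      else extractALoop rest seq in_three
    else if in_three = true ∧ line ≠ "" then extractALoop rest (seq ++ [PySem.Str.upper line]) in_three
    else extractALoop rest seq in_three

def extract_three (text : String) : String :=
  PySem.Str.join "" (extractALoop ((PySem.Str.split? text "\n").getD []) [] false)

-- ===== PORT B =====
-- next((k for k, l in E if P(l)), None) over an enumerate list
def pyNextIdx (P : String → Bool) : List (Int × String) → Option Int
  | [] => none
  | (k, l) :: rest => if P l then some k else pyNextIdx P rest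

def extract_three_alt (text : String) : String :=
  let lines := (PySem.Str.split? text "\n").getD []
  match pyNextIdx (fun l => PySem.Str.startswith l ">THREE") (PySem.List.enumerate lines 0) with
  | none => ""
  | some i =>
    let body := PySem.List.slice lines (some (i + 1)) none
    let body' :=
      match pyNextIdx (fun l => PySem.Str.startswith l ">") (PySem.List.enumerate body 0) with
      | none => body
      | some j => PySem.List.slice body none (some j)
    PySem.Str.join "" ((body'.filter (fun l => l ≠ "")).map PySem.Str.upper)

-- ===== PRECONDITION & SPEC =====
def Spec_extract_three (text : String) (out : String) : Prop := out = extract_three_alt text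
instance (text : String) (out : String) : Decidable (Spec_extract_three text out) := by unfold Spec_extract_three; infer_instance

-- ===== CLAIM (what is proved, stated in full; the proofs are below) =====
def Claim_equal_extract_three : Prop := ∀ (text : String), Dom_extract_three text → Spec_extract_three text (extract_three text)

-- ===== LEMMAS AND PROOFS =====

theorem cond_eq (l : String) :
    (l ≠ "" ∧ PySem.Str.pyGet? l 0 = some '>') ↔ PySem.Str.startswith l ">" = true := by
  rw [PySem.Str.startswith_eq, PySem.Chars.startswith_iff]
  simp only [ne_eq]
  rw [(not_congr String.toList_eq_nil_iff).symm]
  have hget : PySem.Str.pyGet? l 0 = PySem.List.pyGet? l.toList 0 := by simp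
  rw [hget, PySem.List.pyGet?_zero]
  cases h : l.toList with
  | nil => simp
  | cons c cs =>
      constructor
      · rintro ⟨-, hc⟩
        simp only [List.getElem?_cons_zero, Option.some.injEq] at hc
        show ['>'] <+: c :: cs
        rw [List.cons_prefix_cons]
        exact ⟨hc.symm, List.nil_prefix⟩
      · intro hp
        have : '>' = c ∧ ([] : List Char) <+: cs := List.cons_prefix_cons.mp hp
        exact ⟨by simp, by simp [this.1.symm]⟩

theorem p_imp_q (l : String) (h : PySem.Str.startswith l ">THREE" = true) :
    PySem.Str.startswith l ">" = true := by
  rw [PySem.Str.startswith_eq, PySem.Chars.startswith_iff] at h ⊢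
  exact List.IsPrefix.trans (by decide) h

theorem pyNextIdx_enum (P : String → Bool) : ∀ (ls : List String) (s : Int),
    pyNextIdx P (PySem.List.enumerate ls s) = (List.findIdx? P ls).map (fun k : Nat => s + (k : Int)) := by
  intro ls
  induction ls with
  | nil => intro s; simp [pyNextIdx, PySem.List.enumerate_nil]
  | cons l rest ih =>
      intro s
      rw [PySem.List.enumerate_cons]
      show (if P l then some s else pyNextIdx P (PySem.List.enumerate rest (s+1))) = _
      rw [List.findIdx?_cons]
      by_cases hP : P l = true
      · rw [if_pos hP, if_pos hP]
        simp
      · rw [if_neg hP, if_neg hP, ih (s+1), Option.map_map]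
        congr 1
        funext i
        show s + 1 + (i : Int) = s + ((i + 1 : Nat) : Int)
        push_cast
        ring

theorem fi_none {P : String → Bool} : ∀ {ls : List String}, List.findIdx? P ls = none →
    ls.takeWhile (fun l => !P l) = ls ∧ ls.dropWhile (fun l => !P l) = [] := by
  intro ls
  induction ls with
  | nil => simp
  | cons l rest ih =>
      intro h
      rw [List.findIdx?_cons] at h
      by_cases hP : P l = true
      · rw [if_pos hP] at h
        cases h
      · rw [if_neg hP] at h
        obtain ⟨h1, h2⟩ := ih (Option.map_eq_none_iff.mp h)
        simp [hP, h1, h2]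

theorem fi_some {P : String → Bool} : ∀ {ls : List String} {k : Nat},
    List.findIdx? P ls = some k →
    ls.takeWhile (fun l => !P l) = ls.take k ∧ ls.dropWhile (fun l => !P l) = ls.drop k ∧
      k < ls.length := by
  intro ls
  induction ls with
  | nil => intro k h; simp at h
  | cons l rest ih =>
      intro k h
      rw [List.findIdx?_cons] at h
      by_cases hP : P l = true
      · rw [if_pos hP] at h
        injection h with h0
        subst h0
        simp [hP]
      · simp only [hP, Bool.false_eq_true, if_false] at h
        obtain ⟨k', hk', rfl⟩ := Option.map_eq_some_iff.mp h
        obtain ⟨h1, h2, h3⟩ := ih hk'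
        refine ⟨?_, ?_, by simpa using h3⟩
        · simp [hP, h1]
        · simp [hP, h2]

theorem phase_true : ∀ (ls : List String) (seq : List String),
    extractALoop ls seq true =
      seq ++ ((ls.takeWhile (fun l => !PySem.Str.startswith l ">")).filter
        (fun l => l ≠ "")).map PySem.Str.upper := by
  intro ls
  induction ls with
  | nil => intro seq; simp [extractALoop]
  | cons l rest ih =>
      intro seq
      show (if l ≠ "" ∧ PySem.Str.pyGet? l 0 = some '>' then _ else _) = _
      by_cases hq : PySem.Str.startswith l ">" = true
      · rw [if_pos ((cond_eq l).mpr hq), if_pos rfl, List.takeWhile_cons, hq]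
        simp
      · have hq' : PySem.Str.startswith l ">" = false := Bool.eq_false_iff.mpr hq
        rw [if_neg (fun hc => hq ((cond_eq l).mp hc))]
        by_cases hl : l = ""
        · subst hl
          rw [if_neg (by simp), ih seq, List.takeWhile_cons, hq', Bool.not_false, if_pos rfl,
            List.filter_cons]
          simp
        · rw [if_pos ⟨rfl, hl⟩, ih, List.takeWhile_cons, hq', Bool.not_false, if_pos rfl,
            List.filter_cons]
          simp [hl]

theorem phase_false : ∀ (ls : List String) (seq : List String),
    extractALoop ls seq false =
      match ls.dropWhile (fun l => !PySem.Str.startswith l ">THREE") with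
      | [] => seq
      | _ :: post => extractALoop post seq true := by
  intro ls
  induction ls with
  | nil => intro seq; simp [extractALoop]
  | cons l rest ih =>
      intro seq
      show (if l ≠ "" ∧ PySem.Str.pyGet? l 0 = some '>' then _ else _) = _
      by_cases hp : PySem.Str.startswith l ">THREE" = true
      · rw [if_pos ((cond_eq l).mpr (p_imp_q l hp)), if_neg (by simp), if_pos hp,
          List.dropWhile_cons, hp]
        simp
      · have hp' : PySem.Str.startswith l ">THREE" = false := Bool.eq_false_iff.mpr hp
        rw [List.dropWhile_cons, hp', Bool.not_false, if_pos rfl]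
        by_cases hq : PySem.Str.startswith l ">" = true
        · rw [if_pos ((cond_eq l).mpr hq), if_neg (by simp), if_neg (by simp)]
          exact ih seq
        · rw [if_neg (fun hc => hq ((cond_eq l).mp hc)), if_neg (by simp)]
          exact ih seq

-- ===== VERDICT (by name: the statement is the Claim_ definition above) =====
theorem extract_three_spec : Claim_equal_extract_three := by
  intro text _
  unfold Spec_extract_three extract_three extract_three_alt
  generalize ((PySem.Str.split? text "\n").getD []) = lines
  simp only []
  rw [pyNextIdx_enum, phase_false]
  cases h : List.findIdx? (fun l => PySem.Str.startswith l ">THREE") lines with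
  | none =>
      obtain ⟨-, hdw⟩ := fi_none h
      rw [hdw]
      simp [PySem.Str.join, PySem.Chars.join, List.intercalate]
  | some k =>
      obtain ⟨-, hdw, hk⟩ := fi_some h
      rw [hdw, List.drop_eq_getElem_cons hk]
      simp only [Option.map_some]
      have hbody : PySem.List.slice lines (some (0 + (k : Int) + 1)) none = lines.drop (k + 1) := by
        rw [PySem.List.slice_from lines (by omega)]
        congr 1
        omega
      rw [hbody, pyNextIdx_enum, phase_true]
      cases h2 : List.findIdx? (fun l => PySem.Str.startswith l ">") (lines.drop (k + 1)) with
      | none =>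
          obtain ⟨htw, -⟩ := fi_none h2
          rw [htw]
          simp
      | some j =>
          obtain ⟨htw, -, -⟩ := fi_some h2
          rw [htw]
          simp only [Option.map_some]
          have hb : PySem.List.slice (lines.drop (k + 1)) none (some (0 + (j : Int))) =
              (lines.drop (k + 1)).take j := by
            rw [PySem.List.slice_to _ (by omega)]
            congr 1
            omega
          rw [hb]
          simp
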